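-- pv_equiv track=rewrite | github.com/RP-1106/Data-Structures-Practise | 1578-minimum-time-to-make-rope-colorful/1578-minimum-time-to-make-rope-colorful.py | minCost
-- ===== SOURCE A (Python) =====
-- def minCost(colors, neededTime):
--     """
--     :type colors: str
--     :type neededTime: List[int]
--     :rtype: int
--     """
--     output=0
--     n=len(colors)
--     stack=[(colors[0],0)]
--     for i in range(1,n):
--         if stack[-1][0]==colors[i]:
--             if neededTime[stack[-1][1]]<=neededTime[i]:
--                 color,index = stack.pop(-1)
--                 output+=neededTime[index]
--                 stack.append((colors[i],i))
--             else:
--                output+=neededTime[i]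
--         else:
--             stack.append((colors[i],i))
--     return output
-- ===== SOURCE B (Python) =====
-- def minCost(colors, neededTime):
--     """
--     :type colors: str
--     :type neededTime: List[int]
--     :rtype: int
--     """
--     total = 0
--     n = len(colors)
--     i = 0
--     while i < n:
--         j = i + 1
--         while j < n and colors[j] == colors[i]:
--             j += 1
--         if j - i >= 2:
--             block = [neededTime[k] for k in range(i, j)]
--             total += sum(block) - max(block)
--         i = j
--     return total
-- ===== Notes on version B (the rewrite author's own statement) =====
-- stated objective: alternative
-- what changed: B splits the string into maximal runs of equal adjacent colors and adds sum-minus-max of each run's times, instead of A's stack of (color,index) pairs with a running pop/compare per character.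
-- crash fix: On empty colors A raises IndexError (colors[0]); B returns 0. — e.g. on minCost("", []): A raises IndexError, B returns 0
import Mathlib
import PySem

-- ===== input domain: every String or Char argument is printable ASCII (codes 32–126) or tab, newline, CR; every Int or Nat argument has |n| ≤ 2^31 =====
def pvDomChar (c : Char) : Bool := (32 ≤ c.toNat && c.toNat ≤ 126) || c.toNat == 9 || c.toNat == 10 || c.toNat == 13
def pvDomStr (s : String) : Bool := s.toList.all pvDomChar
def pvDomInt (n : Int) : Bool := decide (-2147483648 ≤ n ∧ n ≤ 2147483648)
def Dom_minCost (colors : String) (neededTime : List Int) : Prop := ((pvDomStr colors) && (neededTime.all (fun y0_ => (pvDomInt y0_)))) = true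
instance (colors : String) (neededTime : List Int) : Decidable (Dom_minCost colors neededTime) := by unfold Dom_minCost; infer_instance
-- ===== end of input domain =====

-- B replaces A's explicit stack of (color, index) pairs by a split of the string into
-- maximal runs of equal adjacent colors, adding sum-minus-max of each run's times.

-- ===== PORT A =====
-- A's for-loop over i in range(1, n); stack kept head-as-top; neededTime reads via pyGet?
-- (none = IndexError, propagated as none; those inputs are excluded by Pre_).
def pvALoop (nt : List Int) : List Char → Int → List (Char × Int) → Int → Option Int
  | [], _, _, out => some out
  | ci :: cs, i, stack, out =>
    match stack with
    | [] => none
    | (c, idx) :: rest =>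
      if c = ci then
        match PySem.List.pyGet? nt idx, PySem.List.pyGet? nt i with
        | some tTop, some tI =>
          if tTop ≤ tI then pvALoop nt cs (i + 1) ((ci, i) :: rest) (out + tTop)
          else pvALoop nt cs (i + 1) ((c, idx) :: rest) (out + tI)
        | _, _ => none
      else pvALoop nt cs (i + 1) ((ci, i) :: (c, idx) :: rest) out

def minCost (colors : String) (neededTime : List Int) : Int :=
  match colors.toList with
  | [] => 0   -- Python raises IndexError at colors[0]; excluded by Pre_
  | c0 :: cs => (pvALoop neededTime cs 1 [(c0, 0)] 0).getD 0

-- ===== PORT B =====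
-- B's outer while-loop: peel one maximal run per step (inner while = takeWhile/dropWhile),
-- read the run's block of times (none = IndexError), add sum(block) - max(block).
def pvBLoop (nt : List Int) : List Char → Int → Option Int
  | [], _ => some 0
  | c :: cs, i =>
    let run := cs.takeWhile (fun x => x == c)
    let rest := cs.dropWhile (fun x => x == c)
    if 1 ≤ run.length then
      match (PySem.List.pyRange i (i + 1 + (run.length : Int)) 1).mapM (fun k => PySem.List.pyGet? nt k) with
      | some (b :: bs) =>
        (pvBLoop nt rest (i + 1 + (run.length : Int))).map
          (fun t => ((b :: bs).foldl (fun a x => a + x) 0 - bs.foldl (fun a x => max a x) b) + t)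
      | _ => none
    else pvBLoop nt cs (i + 1)
termination_by cs _ => cs.length
decreasing_by
  · have := List.length_dropWhile_le (fun x => x == c) cs
    simp only [List.length_cons]; omega
  · simp

def minCost_alt (colors : String) (neededTime : List Int) : Int :=
  (pvBLoop neededTime colors.toList 0).getD 0

-- ===== PRECONDITION & SPEC =====
-- Pre_ excludes exactly the inputs on which A raises IndexError: empty colors (colors[0]),
-- and any adjacent-duplicate position at or beyond len(neededTime).
def Pre_minCost (colors : String) (neededTime : List Int) : Prop :=
  colors.toList ≠ [] ∧
    ∀ j < colors.toList.length, 1 ≤ j → colors.toList[j]! = colors.toList[j-1]! →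
      j < neededTime.length

instance (colors : String) (neededTime : List Int) : Decidable (Pre_minCost colors neededTime) := by
  unfold Pre_minCost; infer_instance

def pvWitness_minCost : String × List Int := ("aab", [1, 2, 3])

-- On empty colors A raises IndexError (colors[0]); B returns 0.
def Raises_minCost (colors : String) (neededTime : List Int) : Prop := colors = ""

instance (colors : String) (neededTime : List Int) : Decidable (Raises_minCost colors neededTime) := by
  unfold Raises_minCost; infer_instance

def pvRaiseWitness_minCost : String × List Int := ("", [])
def pvRaiseWitnessOut_minCost : Int := 0

def Spec_minCost (colors : String) (neededTime : List Int) (out : Int) : Prop := out = minCost_alt colors neededTime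
instance (colors : String) (neededTime : List Int) (out : Int) : Decidable (Spec_minCost colors neededTime out) := by unfold Spec_minCost; infer_instance

-- ===== CLAIM (what is proved, stated in full; the proofs are below) =====
def Claim_equal_minCost : Prop := ∀ (colors : String) (neededTime : List Int), Dom_minCost colors neededTime → Pre_minCost colors neededTime → Spec_minCost colors neededTime (minCost colors neededTime)

def Claim_raises_minCost : Prop := (∀ (colors : String) (neededTime : List Int), Dom_minCost colors neededTime → Raises_minCost colors neededTime → ¬ Pre_minCost colors neededTime) ∧ (Dom_minCost (pvRaiseWitness_minCost.1) (pvRaiseWitness_minCost.2) ∧ Raises_minCost (pvRaiseWitness_minCost.1) (pvRaiseWitness_minCost.2) ∧ minCost_alt (pvRaiseWitness_minCost.1) (pvRaiseWitness_minCost.2) = pvRaiseWitnessOut_minCost)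

-- ===== LEMMAS AND PROOFS =====

-- the duplicate-position precondition, localized: cs are the colors at indices i, i+1, …,
-- and c is the color at index i-1; every adjacent-duplicate position is < nt.length
def pvDupOK (nt : List Int) (cs : List Char) (c : Char) (i : Nat) : Prop :=
  ∀ j < cs.length, cs[j]! = (if j = 0 then c else cs[j-1]!) → i + j < nt.length

lemma pvDupOK_shift (nt : List Int) (c' : Char) (cs : List Char) (c : Char) (i : Nat)
    (h : pvDupOK nt (c' :: cs) c i) : pvDupOK nt cs c' (i + 1) := by
  intro j hj he
  have := h (j + 1) (by simpa using Nat.succ_lt_succ hj) ?_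
  · omega
  · cases j with
    | zero => simpa using he
    | succ m => simpa using he

-- pure value of A's loop, as a single-pass recursion carrying the running max tc of the
-- current run (tc = nt[idx] where idx is A's stack-top index)
def pvHeadVal (nt : List Int) : List Char → Nat → Char → Int → Int
  | [], _, _, _ => 0
  | c' :: cs, i, c, tc =>
    if c' = c then
      if tc ≤ nt.getD i 0 then tc + pvHeadVal nt cs (i + 1) c' (nt.getD i 0)
      else nt.getD i 0 + pvHeadVal nt cs (i + 1) c tc
    else pvHeadVal nt cs (i + 1) c' (nt.getD i 0)

-- pure value of B: the whole rope starting at index i with head color c at index i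
def pvRunsVal (nt : List Int) : List Char → Nat → Int
  | [], _ => 0
  | c :: cs, i => pvHeadVal nt cs (i + 1) c (nt.getD i 0)

def pvSum (nt : List Int) : Nat → Nat → Int
  | 0, _ => 0
  | k + 1, i => nt.getD i 0 + pvSum nt k (i + 1)

def pvMax (nt : List Int) : Nat → Nat → Int → Int
  | 0, _, acc => acc
  | k + 1, i, acc => pvMax nt k (i + 1) (max acc (nt.getD i 0))

def pvBlock (nt : List Int) : Nat → Nat → List Int
  | 0, _ => []
  | m + 1, i => nt.getD i 0 :: pvBlock nt m (i + 1)

-- ---- A-side: pvALoop = out + pvHeadVal ----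
lemma pvA_loop_eq (nt : List Int) (cs : List Char) : ∀ (i idx : Nat) (c : Char)
    (S : List (Char × Int)) (out : Int),
    pvDupOK nt cs c i → (cs.head? = some c → idx < nt.length) →
    pvALoop nt cs (i : Int) ((c, (idx : Int)) :: S) out
      = some (out + pvHeadVal nt cs i c (nt.getD idx 0)) := by
  induction cs with
  | nil => intro i idx c S out _ _; simp [pvALoop, pvHeadVal]
  | cons ci cs ih =>
    intro i idx c S out hdup hidx
    have hshift := pvDupOK_shift nt ci cs c i hdup
    by_cases hc : c = ci
    · subst hc
      have hi : i < nt.length := by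
        have := hdup 0 (by simp) (by simp)
        omega
      have hidx' : idx < nt.length := hidx rfl
      have gidx : PySem.List.pyGet? nt (idx : Int) = some (nt.getD idx 0) := by
        rw [PySem.List.pyGet?_natCast, List.getD_eq_getElem?_getD]
        simp [List.getElem?_eq_getElem hidx']
      have gi : PySem.List.pyGet? nt (i : Int) = some (nt.getD i 0) := by
        rw [PySem.List.pyGet?_natCast, List.getD_eq_getElem?_getD]
        simp [List.getElem?_eq_getElem hi]
      rw [pvALoop, gidx, gi]
      simp only [if_pos rfl]
      by_cases hle : nt.getD idx 0 ≤ nt.getD i 0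
      · rw [if_pos hle]
        have : ((i : Int) + 1) = ((i + 1 : Nat) : Int) := by push_cast; ring
        rw [this, ih (i + 1) i c S (out + nt.getD idx 0) hshift (fun _ => hi)]
        rw [pvHeadVal]
        simp only [if_pos rfl, if_pos hle, if_true]
        congr 1; ring
      · rw [if_neg hle]
        have : ((i : Int) + 1) = ((i + 1 : Nat) : Int) := by push_cast; ring
        rw [this, ih (i + 1) idx c S (out + nt.getD i 0) hshift (fun _ => hidx')]
        rw [pvHeadVal]
        simp only [if_pos rfl, if_neg hle, if_true]
        congr 1; ring
    · rw [pvALoop]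
      rw [if_neg hc]
      have hidx2 : cs.head? = some ci → i < nt.length := by
        intro hh
        cases cs with
        | nil => simp at hh
        | cons a l =>
          have ha : a = ci := by simpa using hh
          have := hshift 0 (by simp) (by simp [ha])
          omega
      have : ((i : Int) + 1) = ((i + 1 : Nat) : Int) := by push_cast; ring
      rw [this, ih (i + 1) i ci ((c, (idx : Int)) :: S) out hshift hidx2]
      rw [pvHeadVal]
      rw [if_neg (fun h => hc h.symm)]

-- ---- run-peeling characterisation of pvHeadVal ----
lemma pvHeadVal_peel (nt : List Int) (cs : List Char) : ∀ (i : Nat) (c : Char) (tc : Int),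
    pvHeadVal nt cs i c tc
      = (tc + pvSum nt (cs.takeWhile (fun x => x == c)).length i
          - pvMax nt (cs.takeWhile (fun x => x == c)).length i tc)
        + pvRunsVal nt (cs.dropWhile (fun x => x == c))
            (i + (cs.takeWhile (fun x => x == c)).length) := by
  induction cs with
  | nil => intro i c tc; simp [pvHeadVal, pvRunsVal, pvSum, pvMax]
  | cons c' cs ih =>
    intro i c tc
    by_cases hc : c' = c
    · subst hc
      rw [List.takeWhile_cons_of_pos (by simp), List.dropWhile_cons_of_pos (by simp)]
      simp only [List.length_cons]
      rw [pvHeadVal]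
      simp only [if_pos rfl]
      rw [pvSum, pvMax]
      have harith : i + ((cs.takeWhile (fun x => x == c')).length + 1)
          = i + 1 + (cs.takeWhile (fun x => x == c')).length := by omega
      by_cases hle : tc ≤ nt.getD i 0
      · rw [if_pos hle, ih (i + 1) c' (nt.getD i 0)]
        have hm : max tc (nt.getD i 0) = nt.getD i 0 := max_eq_right hle
        rw [hm, harith]; simp only [if_true]; try ring
      · rw [if_neg hle, ih (i + 1) c' tc]
        have hm : max tc (nt.getD i 0) = tc := max_eq_left (by omega)
        rw [hm, harith]; simp only [if_true]; try ring
    · have hbf : (c' == c) = false := by simp [hc]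
      simp only [List.takeWhile_cons, List.dropWhile_cons, hbf, Bool.false_eq_true, if_false,
        List.length_nil]
      rw [pvHeadVal, if_neg hc, pvRunsVal]
      simp [pvSum, pvMax]

-- ---- B-side block computations ----
lemma pvMapM_block (nt : List Int) : ∀ (m i : Nat), (∀ d < m, i + d < nt.length) →
    ((PySem.List.pyRange (i : Int) ((i : Int) + (m : Int)) 1).mapM
        (fun k => PySem.List.pyGet? nt k)) = some (pvBlock nt m i) := by
  intro m
  induction m with
  | zero =>
    intro i _
    rw [PySem.List.pyRange_one_eq_nil (by simp)]
    simp [pvBlock]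
  | succ m ih =>
    intro i h
    have hi : i < nt.length := by have := h 0 (by omega); omega
    have gi : PySem.List.pyGet? nt (i : Int) = some (nt.getD i 0) := by
      rw [PySem.List.pyGet?_natCast, List.getD_eq_getElem?_getD]
      simp [List.getElem?_eq_getElem hi]
    rw [PySem.List.pyRange_one_cons (by push_cast; omega)]
    have hpt : ((i : Int) + 1) = ((i + 1 : Nat) : Int) := by push_cast; ring
    have hend : (i : Int) + ((m + 1 : Nat) : Int) = ((i + 1 : Nat) : Int) + (m : Int) := by
      push_cast; ring
    rw [List.mapM_cons, gi, hpt, hend,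
      ih (i + 1) (fun d hd => by have := h (d + 1) (by omega); omega)]
    simp [pvBlock]

lemma pvBlock_sum (nt : List Int) : ∀ (m i : Nat) (a : Int),
    (pvBlock nt m i).foldl (fun a x => a + x) a = a + pvSum nt m i := by
  intro m
  induction m with
  | zero => intro i a; simp [pvBlock, pvSum]
  | succ m ih => intro i a; rw [pvBlock, pvSum]; simp only [List.foldl_cons]; rw [ih]; ring

lemma pvBlock_max (nt : List Int) : ∀ (m i : Nat) (b : Int),
    (pvBlock nt m i).foldl (fun a x => max a x) b = pvMax nt m i b := by
  intro m
  induction m with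
  | zero => intro i b; simp [pvBlock, pvMax]
  | succ m ih => intro i b; rw [pvBlock, pvMax]; simp only [List.foldl_cons]; rw [ih]

lemma pvTakeWhile_all (cs : List Char) : ∀ (c : Char) (e : Nat),
    e < (cs.takeWhile (fun x => x == c)).length → cs[e]! = c := by
  induction cs with
  | nil => intro c e h; simp at h
  | cons c' cs ih =>
    intro c e h
    by_cases hc : c' = c
    · subst hc
      simp only [List.takeWhile_cons, beq_self_eq_true, if_pos, List.length_cons] at h
      cases e with
      | zero => simp
      | succ m => simpa using ih c' m (by omega)
    · have hb : (c' == c) = false := by simp [hc]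
      simp [List.takeWhile_cons, hb] at h

lemma pvDupOK_dropWhile (nt : List Int) (cs : List Char) : ∀ (c : Char) (i : Nat),
    pvDupOK nt cs c i →
    pvDupOK nt (cs.dropWhile (fun x => x == c)) c (i + (cs.takeWhile (fun x => x == c)).length) := by
  induction cs with
  | nil => intro c i h; simpa using h
  | cons c' cs ih =>
    intro c i h
    by_cases hc : c' = c
    · subst hc
      simp only [List.takeWhile_cons, List.dropWhile_cons, beq_self_eq_true, if_pos, List.length_cons]
      have := ih c' (i + 1) (pvDupOK_shift nt c' cs c' i h)
      have harith : i + ((cs.takeWhile (fun x => x == c')).length + 1)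
          = i + 1 + (cs.takeWhile (fun x => x == c')).length := by omega
      rw [harith]
      exact this
    · have hb : (c' == c) = false := by simp [hc]
      simpa [List.takeWhile_cons, List.dropWhile_cons, hb] using h

-- ---- B-side: pvBLoop = some pvRunsVal ----
lemma pvB_loop_eq (nt : List Int) : ∀ (n : Nat) (cs : List Char) (i : Nat) (c : Char),
    cs.length ≤ n → pvDupOK nt cs c (i + 1) →
    pvBLoop nt (c :: cs) (i : Int) = some (pvRunsVal nt (c :: cs) i) := by
  intro n
  induction n with
  | zero =>
    intro cs i c hn _
    have : cs = [] := List.length_eq_zero_iff.mp (by omega)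
    subst this
    rw [pvBLoop]
    simp [pvBLoop, pvRunsVal, pvHeadVal]
  | succ n ih =>
    intro cs i c hn hdup
    rw [pvBLoop]
    by_cases hrun : 1 ≤ (cs.takeWhile (fun x => x == c)).length
    · rw [if_pos hrun]
      set k := (cs.takeWhile (fun x => x == c)).length with hk
      -- every block index i + d, d ≤ k, is in range
      have hc0 : cs[0]! = c := pvTakeWhile_all cs c 0 (by omega)
      have hlt : ∀ d < k + 1, i + d < nt.length := by
        intro d hd
        cases d with
        | zero =>
          have hlen : 0 < cs.length := by
            have : (List.takeWhile (fun x => x == c) cs).length ≤ cs.length :=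
              (List.takeWhile_sublist _).length_le
            omega
          have := hdup 0 hlen (by simp [hc0])
          omega
        | succ e =>
          have hlen : k ≤ cs.length := by
            have : (List.takeWhile (fun x => x == c) cs).length ≤ cs.length :=
              (List.takeWhile_sublist _).length_le
            omega
          have h1 : cs[e]! = c := pvTakeWhile_all cs c e (by omega)
          have h2 : cs[e]! = (if e = 0 then c else cs[e-1]!) := by
            cases e with
            | zero => simpa using h1
            | succ f =>
              have := pvTakeWhile_all cs c f (by omega)
              simp [h1, this]
          have := hdup e (by omega) h2
          omega
      have hcast : (i : Int) + 1 + (k : Int) = (i : Int) + ((k + 1 : Nat) : Int) := by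
        push_cast; ring
      rw [hcast, pvMapM_block nt (k + 1) i hlt]
      rw [pvBlock]
      -- the recursive call on the rest of the rope
      have hrest := pvDupOK_dropWhile nt cs c (i + 1) hdup
      have hcast2 : (i : Int) + ((k + 1 : Nat) : Int) = ((i + 1 + k : Nat) : Int) := by
        push_cast; ring
      have hrec : pvBLoop nt (cs.dropWhile (fun x => x == c)) ((i + 1 + k : Nat) : Int)
          = some (pvRunsVal nt (cs.dropWhile (fun x => x == c)) (i + 1 + k)) := by
        cases hrest' : cs.dropWhile (fun x => x == c) with
        | nil => rw [pvBLoop]; simp [pvRunsVal]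
        | cons c3 cs3 =>
          apply ih cs3 (i + 1 + k) c3
          · have h1 : (cs.dropWhile (fun x => x == c)).length ≤ cs.length :=
              List.length_dropWhile_le _ _
            rw [hrest'] at h1
            simp only [List.length_cons] at h1
            omega
          · have := hrest
            rw [hrest'] at this
            have := pvDupOK_shift nt c3 cs3 c (i + 1 + (cs.takeWhile (fun x => x == c)).length) this
            have harith : i + 1 + (cs.takeWhile (fun x => x == c)).length + 1 = i + 1 + k + 1 := by
              rw [hk]
            rwa [harith] at this
      rw [hcast2, hrec]
      -- compute the contribution
      simp only [Option.map_some, Option.some.injEq]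
      rw [List.foldl_cons, pvBlock_sum nt k (i + 1), pvBlock_max nt k (i + 1)]
      rw [pvRunsVal, pvHeadVal_peel nt cs (i + 1) c (nt.getD i 0), ← hk]
      ring
    · rw [if_neg hrun]
      have hempty : cs.takeWhile (fun x => x == c) = [] := by
        cases h : cs.takeWhile (fun x => x == c) with
        | nil => rfl
        | cons a l => rw [h] at hrun; simp at hrun
      cases cs with
      | nil => rw [pvBLoop]; simp [pvRunsVal, pvHeadVal]
      | cons c'' cs'' =>
        have hne : (c'' == c) = false := by
          by_contra hcontra
          have : (c'' == c) = true := by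
            cases h : (c'' == c) with
            | false => exact absurd h hcontra
            | true => rfl
          simp [List.takeWhile_cons, this] at hempty
        have hcast : (i : Int) + 1 = ((i + 1 : Nat) : Int) := by push_cast; ring
        rw [hcast, ih cs'' (i + 1) c'' (by simp at hn; omega)
          (pvDupOK_shift nt c'' cs'' c (i + 1) hdup)]
        rw [pvRunsVal, pvRunsVal, pvHeadVal]
        have hnec : ¬ (c'' = c) := by simpa using hne
        rw [if_neg hnec]

-- ===== VERDICT (by name: the statement is the Claim_ definition above) =====
theorem minCost_spec : Claim_equal_minCost := by
  intro colors nt _ hpre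
  unfold Spec_minCost minCost minCost_alt
  obtain ⟨hne, hdup⟩ := hpre
  cases hcs : colors.toList with
  | nil => exact absurd hcs hne
  | cons c0 cs =>
    rw [hcs] at hdup
    have hdup' : pvDupOK nt cs c0 1 := by
      intro j hj he
      have h1 : (c0 :: cs)[j+1]! = cs[j]! := by simp
      have h2 : (c0 :: cs)[j]! = (if j = 0 then c0 else cs[j-1]!) := by
        cases j with
        | zero => simp
        | succ m => simp
      have := hdup (j + 1) (by simp; omega) (by omega) ?_
      · omega
      · rw [h1, he]
        simpa using h2.symm
    have hidx : cs.head? = some c0 → 0 < nt.length := by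
      intro hh
      cases cs with
      | nil => simp at hh
      | cons a l =>
        have ha : a = c0 := by simpa using hh
        have := hdup' 0 (by simp) (by simp [ha])
        omega
    have hA := pvA_loop_eq nt cs 1 0 c0 [] 0 hdup' hidx
    have hB := pvB_loop_eq nt cs.length cs 0 c0 (le_refl _) (by simpa using hdup')
    simp only [Nat.cast_one, Nat.cast_zero] at hA hB
    show (pvALoop nt cs 1 [(c0, 0)] 0).getD 0 = (pvBLoop nt (c0 :: cs) 0).getD 0
    rw [hA, hB]
    simp [pvRunsVal]

theorem minCost_raises : Claim_raises_minCost := by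
  unfold Claim_raises_minCost
  constructor
  · intro colors nt _ hr hpre
    exact hpre.1 (by rw [hr]; rfl)
  · refine ⟨by decide, rfl, ?_⟩
    have h : ("" : String).toList = [] := rfl
    simp [minCost_alt, pvRaiseWitness_minCost, pvRaiseWitnessOut_minCost, h, pvBLoop]

-- witness self-check: the raise-witness really lies inside Raises_minCost
theorem pvRaiseWitness_ok :
    Raises_minCost pvRaiseWitness_minCost.1 pvRaiseWitness_minCost.2 :=
  minCost_raises.2.2.1
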